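-- pv_equiv track=rewrite | github.com/stephanedenis/PaniniFS | analogy_detector_mvp.py | find_universal_patterns
-- ===== SOURCE A (Python) =====
-- def find_universal_patterns(struct1, struct2):
--     """Recherche patterns universels entre domaines"""
--     # Mapping concepts universels
--     universal_mappings = {
--         'conditional': ['if', 'choice', 'decision'],
--         'sequence': ['then', 'next', 'after'],
--         'character': ['function', 'actor', 'agent'],
--         'action': ['execution', 'verb', 'process']
--     }
--
--     patterns1 = [p.split(':')[0] for p in struct1]
--     patterns2 = [p.split(':')[0] for p in struct2]
--
--     universal_found = []
--     for universal, concepts in universal_mappings.items():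
--         if any(c in patterns1 for c in concepts) and any(c in patterns2 for c in concepts):
--             universal_found.append(universal)
--
--     return universal_found
-- ===== SOURCE B (Python) =====
-- def find_universal_patterns(struct1, struct2):
--     """Recherche patterns universels entre domaines"""
--     universal_mappings = {
--         'conditional': ['if', 'choice', 'decision'],
--         'sequence': ['then', 'next', 'after'],
--         'character': ['function', 'actor', 'agent'],
--         'action': ['execution', 'verb', 'process']
--     }
--     # reverse index: concept -> universal (concepts are distinct across categories)
--     index = {c: u for u, cs in universal_mappings.items() for c in cs}
--
--     def found(struct):
--         hits = set()
--         for p in struct: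
--             u = index.get(p.split(':')[0])
--             if u is not None:
--                 hits.add(u)
--         return hits
--
--     found1 = found(struct1)
--     found2 = found(struct2)
--     return [u for u in universal_mappings if u in found1 and u in found2]
-- ===== Notes on version B (the rewrite author's own statement) =====
-- stated objective: alternative
-- what changed: Replaces the per-category double scan (each concept list rescans both whole prefix lists) by a reverse index concept->universal and one set-collecting pass over each structure, then filters the mapping keys in insertion order.
import Mathlib
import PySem

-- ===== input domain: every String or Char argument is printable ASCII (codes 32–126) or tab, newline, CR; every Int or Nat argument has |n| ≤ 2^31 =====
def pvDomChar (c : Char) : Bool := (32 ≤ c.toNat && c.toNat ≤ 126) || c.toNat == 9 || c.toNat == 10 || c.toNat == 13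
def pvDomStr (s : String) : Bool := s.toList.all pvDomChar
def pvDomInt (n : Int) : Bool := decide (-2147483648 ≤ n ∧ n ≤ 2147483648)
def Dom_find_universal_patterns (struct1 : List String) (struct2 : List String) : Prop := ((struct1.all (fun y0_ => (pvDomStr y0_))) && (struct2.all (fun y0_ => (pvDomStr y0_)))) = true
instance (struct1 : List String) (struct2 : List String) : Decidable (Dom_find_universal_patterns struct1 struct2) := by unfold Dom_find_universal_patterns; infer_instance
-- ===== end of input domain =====

-- B replaces A's per-category rescans of both prefix lists by a reverse index and one
-- set-collecting pass over each structure (objective: alternative decomposition).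

-- p.split(':')[0] — split(':') is always nonempty, so [0] never raises
def pvSplitHead (p : String) : String :=
  match PySem.Str.split? p ":" with
  | some l => l.headD ""   -- split? = some since the separator is ":" ≠ ""; split(':') is nonempty so [0] is the head
  | none => ""

-- ===== PORT A =====
def pvUM : List (String × List String) :=
  [("conditional", ["if", "choice", "decision"]),
   ("sequence", ["then", "next", "after"]),
   ("character", ["function", "actor", "agent"]),
   ("action", ["execution", "verb", "process"])]

def find_universal_patterns (struct1 : List String) (struct2 : List String) : List String :=
  let patterns1 := struct1.map (fun p => pvSplitHead p)
  let patterns2 := struct2.map (fun p => pvSplitHead p)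
  pvUM.foldl (fun acc uc =>
    if (uc.2.any (fun c => patterns1.contains c)) && (uc.2.any (fun c => patterns2.contains c))
    then acc ++ [uc.1] else acc) []

-- ===== PORT B =====
def pvRevIndex : PySem.Dict String String := PySem.Dict.ofList
  [("if", "conditional"), ("choice", "conditional"), ("decision", "conditional"),
   ("then", "sequence"), ("next", "sequence"), ("after", "sequence"),
   ("function", "character"), ("actor", "character"), ("agent", "character"),
   ("execution", "action"), ("verb", "action"), ("process", "action")]

def pvFound (struct : List String) : PySem.Set String :=
  struct.foldl (fun hits p =>
    match pvRevIndex.get? (pvSplitHead p) with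
    | some u => PySem.Set.add hits u
    | none => hits) PySem.Set.empty

def find_universal_patterns_alt (struct1 : List String) (struct2 : List String) : List String :=
  let found1 := pvFound struct1
  let found2 := pvFound struct2
  (["conditional", "sequence", "character", "action"] : List String).filter
    (fun u => PySem.Set.contains found1 u && PySem.Set.contains found2 u)

-- ===== PRECONDITION & SPEC =====
def Spec_find_universal_patterns (struct1 : List String) (struct2 : List String) (out : List String) : Prop := out = find_universal_patterns_alt struct1 struct2
instance (struct1 : List String) (struct2 : List String) (out : List String) : Decidable (Spec_find_universal_patterns struct1 struct2 out) := by unfold Spec_find_universal_patterns; infer_instance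

-- ===== CLAIM (what is proved, stated in full; the proofs are below) =====
def Claim_equal_find_universal_patterns : Prop := ∀ (struct1 : List String) (struct2 : List String), Dom_find_universal_patterns struct1 struct2 → Spec_find_universal_patterns struct1 struct2 (find_universal_patterns struct1 struct2)

-- ===== LEMMAS AND PROOFS =====

lemma mem_pvFound_aux (s : List String) (acc : PySem.Set String) (u : String) :
    u ∈ s.foldl (fun hits p =>
      match pvRevIndex.get? (pvSplitHead p) with
      | some v => PySem.Set.add hits v
      | none => hits) acc ↔ u ∈ acc ∨ ∃ p ∈ s, pvRevIndex.get? (pvSplitHead p) = some u := by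
  induction s generalizing acc with
  | nil => simp
  | cons p s ih =>
    simp only [List.foldl_cons]
    cases h : pvRevIndex.get? (pvSplitHead p) with
    | none => rw [ih]; simp [h]
    | some v => rw [ih]; simp [PySem.Set.mem_add, h]; tauto

lemma mem_pvFound (s : List String) (u : String) :
    u ∈ pvFound s ↔ ∃ p ∈ s, pvRevIndex.get? (pvSplitHead p) = some u := by
  unfold pvFound
  rw [mem_pvFound_aux]
  simp [PySem.Set.empty]

lemma pvRevIndex_char (u : String) (cs : List String)
    (hc : ∀ x, pvRevIndex.get? x = some u ↔ x ∈ cs)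
    (s : List String) :
    PySem.Set.contains (pvFound s) u
      = cs.any (fun c => (s.map (fun p => pvSplitHead p)).contains c) := by
  rw [Bool.eq_iff_iff, PySem.Set.contains_iff, mem_pvFound]
  simp only [List.any_eq_true, List.contains_iff_mem, List.mem_map]
  constructor
  · rintro ⟨p, hp, hg⟩
    exact ⟨pvSplitHead p, (hc _).mp hg, p, hp, rfl⟩
  · rintro ⟨c, hcsmem, p, hp, hpre⟩
    exact ⟨p, hp, (hc _).mpr (hpre ▸ hcsmem)⟩

set_option maxHeartbeats 2000000 in
lemma pvRevIndex_cond (x : String) :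
    pvRevIndex.get? x = some "conditional" ↔ x ∈ (["if", "choice", "decision"] : List String) := by
  have h : pvRevIndex = PySem.Dict.mk
    [("if", "conditional"), ("choice", "conditional"), ("decision", "conditional"),
     ("then", "sequence"), ("next", "sequence"), ("after", "sequence"),
     ("function", "character"), ("actor", "character"), ("agent", "character"),
     ("execution", "action"), ("verb", "action"), ("process", "action")] := rfl
  simp only [h, PySem.Dict.get?_mk_cons, beq_iff_eq]
  split_ifs <;> first
    | (rename_i hx; subst hx; decide)
    | (simp_all [PySem.Dict.get?]; refine ⟨?_, ?_, ?_⟩ <;> intro hx <;> subst hx <;> simp_all)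

set_option maxHeartbeats 2000000 in
lemma pvRevIndex_sequ (x : String) :
    pvRevIndex.get? x = some "sequence" ↔ x ∈ (["then", "next", "after"] : List String) := by
  have h : pvRevIndex = PySem.Dict.mk
    [("if", "conditional"), ("choice", "conditional"), ("decision", "conditional"),
     ("then", "sequence"), ("next", "sequence"), ("after", "sequence"),
     ("function", "character"), ("actor", "character"), ("agent", "character"),
     ("execution", "action"), ("verb", "action"), ("process", "action")] := rfl
  simp only [h, PySem.Dict.get?_mk_cons, beq_iff_eq]
  split_ifs <;> first
    | (rename_i hx; subst hx; decide)
    | (simp_all [PySem.Dict.get?]; refine ⟨?_, ?_, ?_⟩ <;> intro hx <;> subst hx <;> simp_all)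

set_option maxHeartbeats 2000000 in
lemma pvRevIndex_char' (x : String) :
    pvRevIndex.get? x = some "character" ↔ x ∈ (["function", "actor", "agent"] : List String) := by
  have h : pvRevIndex = PySem.Dict.mk
    [("if", "conditional"), ("choice", "conditional"), ("decision", "conditional"),
     ("then", "sequence"), ("next", "sequence"), ("after", "sequence"),
     ("function", "character"), ("actor", "character"), ("agent", "character"),
     ("execution", "action"), ("verb", "action"), ("process", "action")] := rfl
  simp only [h, PySem.Dict.get?_mk_cons, beq_iff_eq]
  split_ifs <;> first
    | (rename_i hx; subst hx; decide)
    | (simp_all [PySem.Dict.get?]; refine ⟨?_, ?_, ?_⟩ <;> intro hx <;> subst hx <;> simp_all)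

set_option maxHeartbeats 2000000 in
lemma pvRevIndex_acti (x : String) :
    pvRevIndex.get? x = some "action" ↔ x ∈ (["execution", "verb", "process"] : List String) := by
  have h : pvRevIndex = PySem.Dict.mk
    [("if", "conditional"), ("choice", "conditional"), ("decision", "conditional"),
     ("then", "sequence"), ("next", "sequence"), ("after", "sequence"),
     ("function", "character"), ("actor", "character"), ("agent", "character"),
     ("execution", "action"), ("verb", "action"), ("process", "action")] := rfl
  simp only [h, PySem.Dict.get?_mk_cons, beq_iff_eq]
  split_ifs <;> first
    | (rename_i hx; subst hx; decide)
    | (simp_all [PySem.Dict.get?]; refine ⟨?_, ?_, ?_⟩ <;> intro hx <;> subst hx <;> simp_all)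

set_option maxHeartbeats 1000000 in
theorem find_universal_patterns_spec : Claim_equal_find_universal_patterns := by
  intro s1 s2 _
  unfold Spec_find_universal_patterns
  have h1 := pvRevIndex_char "conditional" ["if", "choice", "decision"] pvRevIndex_cond
  have h2 := pvRevIndex_char "sequence" ["then", "next", "after"] pvRevIndex_sequ
  have h3 := pvRevIndex_char "character" ["function", "actor", "agent"] pvRevIndex_char'
  have h4 := pvRevIndex_char "action" ["execution", "verb", "process"] pvRevIndex_acti
  simp only [find_universal_patterns, find_universal_patterns_alt, pvUM,
    List.foldl_cons, List.foldl_nil, List.filter_cons, List.filter_nil,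
    h1, h2, h3, h4, List.nil_append]
  split_ifs <;> rfl
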